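-- pv_equiv track=rewrite | github.com/bradunov/vendor_vunerabilities | sample.py | C_by_vendors
-- ===== SOURCE A (Python) =====
-- def C_by_vendors(c):
--     total_distinct_names = 0
--     name_groups = {}
--     # Iterate through the dictionary to collect unique CISAVendorNAME and their corresponding entries
--     for entry in c:
--         name = entry['CISAVendorNAME'] # extracts the value of "CISAVendorNAME"" attribute from the current entry and assigns it to the variable name
--         if name not in name_groups:
--             name_groups[name] = [entry]
--             total_distinct_names += 1
--         else:
--             name_groups[name].append(entry)
--     return total_distinct_names, name_groups
-- ===== SOURCE B (Python) =====
-- def C_by_vendors(c):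
--     names = list(dict.fromkeys(e['CISAVendorNAME'] for e in c))
--     name_groups = {n: [e for e in c if e['CISAVendorNAME'] == n] for n in names}
--     return len(names), name_groups
-- ===== Notes on version B (the rewrite author's own statement) =====
-- stated objective: simpler
-- what changed: B first deduplicates the vendor names (dict.fromkeys, first-occurrence order) and then builds each group with one filter pass per distinct name, instead of A's single pass that threads a counter and mutates a dict of growing lists.
import Mathlib
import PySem

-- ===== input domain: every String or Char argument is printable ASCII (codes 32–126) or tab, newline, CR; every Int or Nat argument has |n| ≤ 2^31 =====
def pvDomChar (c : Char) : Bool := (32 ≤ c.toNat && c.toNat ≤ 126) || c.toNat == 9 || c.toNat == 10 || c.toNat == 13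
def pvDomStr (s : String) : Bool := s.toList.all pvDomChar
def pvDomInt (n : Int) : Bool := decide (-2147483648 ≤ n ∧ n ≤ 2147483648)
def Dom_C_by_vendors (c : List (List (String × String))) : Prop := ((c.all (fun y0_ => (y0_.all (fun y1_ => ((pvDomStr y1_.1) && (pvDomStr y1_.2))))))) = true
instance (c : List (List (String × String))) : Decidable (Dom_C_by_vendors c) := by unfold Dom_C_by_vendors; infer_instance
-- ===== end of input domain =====

-- B groups entries by first deduplicating the vendor names and then filtering the input once per
-- distinct name, instead of A's single pass mutating a dict of lists; return values are proved equal.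

-- ===== PORT A =====
-- entry['CISAVendorNAME']: first-match association-list lookup; a missing key is a Python
-- KeyError, excluded by Pre_ below (the default "" is never reached inside Pre_).
def pvKey (e : List (String × String)) : String :=
  (((e.find? (fun kv => kv.1 == "CISAVendorNAME")).map Prod.snd).getD "")

-- name_groups[name].append(entry): append to the (unique) group whose key is name
def pvAppendAt (g : List (String × List (List (String × String)))) (name : String)
    (e : List (String × String)) : List (String × List (List (String × String))) :=
  match g with
  | [] => []
  | (n, l) :: t => if n = name then (n, l ++ [e]) :: t else (n, l) :: pvAppendAt t name e

-- one iteration of A's for-loop over (total_distinct_names, name_groups)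
def pvStepA (st : Int × List (String × List (List (String × String))))
    (entry : List (String × String)) : Int × List (String × List (List (String × String))) :=
  let name := pvKey entry
  if (st.2.find? (fun p => p.1 == name)) = none then
    (st.1 + 1, st.2 ++ [(name, [entry])])
  else
    (st.1, pvAppendAt st.2 name entry)

def C_by_vendors (c : List (List (String × String))) : Int × (List (String × List (List (String × String)))) :=
  c.foldl pvStepA (0, [])

-- ===== PORT B =====
-- dict.fromkeys: first-occurrence-order deduplication
def pvFromKeys (acc : List String) : List String → List String
  | [] => acc
  | n :: t => if n ∈ acc then pvFromKeys acc t else pvFromKeys (acc ++ [n]) t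

def C_by_vendors_alt (c : List (List (String × String))) : Int × (List (String × List (List (String × String)))) :=
  let names := pvFromKeys [] (c.map pvKey)
  ((names.length : Int), names.map (fun n => (n, c.filter (fun e => pvKey e == n))))

-- ===== PRECONDITION & SPEC =====
-- Pre_ excludes exactly the inputs where some entry lacks the key 'CISAVendorNAME', on which A raises KeyError.
def Pre_C_by_vendors (c : List (List (String × String))) : Prop :=
  ∀ e ∈ c, "CISAVendorNAME" ∈ e.map Prod.fst
instance (c : List (List (String × String))) : Decidable (Pre_C_by_vendors c) := by unfold Pre_C_by_vendors; infer_instance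
def pvWitness_C_by_vendors : (List (List (String × String))) :=
  [[("CISAVendorNAME", "Acme"), ("id", "1")], [("CISAVendorNAME", "Bolt")], [("CISAVendorNAME", "Acme"), ("id", "2")]]

def Spec_C_by_vendors (c : List (List (String × String))) (out : Int × (List (String × List (List (String × String))))) : Prop := out = C_by_vendors_alt c
instance (c : List (List (String × String))) (out : Int × (List (String × List (List (String × String))))) : Decidable (Spec_C_by_vendors c out) := by unfold Spec_C_by_vendors; infer_instance

-- ===== CLAIM (what is proved, stated in full; the proofs are below) =====
def Claim_equal_C_by_vendors : Prop := ∀ (c : List (List (String × String))), Dom_C_by_vendors c → Pre_C_by_vendors c → Spec_C_by_vendors c (C_by_vendors c)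

-- ===== LEMMAS AND PROOFS =====

-- the first-occurrence-order list of keys of c that are not in ks (the new groups A will create)
def pvNN (ks : List String) : List (List (String × String)) → List String
  | [] => []
  | e :: t => if pvKey e ∈ ks then pvNN ks t else pvKey e :: pvNN (ks ++ [pvKey e]) t

theorem mem_pvNN_not_mem {ks : List String} {c : List (List (String × String))} {n : String}
    (h : n ∈ pvNN ks c) : n ∉ ks := by
  induction c generalizing ks with
  | nil => simp [pvNN] at h
  | cons e t ih =>
    by_cases hk : pvKey e ∈ ks
    · simp [pvNN, hk] at h; exact ih h
    · simp [pvNN, hk] at h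
      rcases h with h | h
      · subst h; exact hk
      · intro hn; exact (ih h) (List.mem_append_left _ hn)

theorem find?_eq_none_iff (g : List (String × List (List (String × String)))) (n : String) :
    (g.find? (fun p => p.1 == n)) = none ↔ n ∉ g.map Prod.fst := by
  induction g with
  | nil => simp
  | cons p t ih =>
    obtain ⟨a, b⟩ := p
    by_cases h : a = n <;> simp [h, ih]
    exact fun _ hq => h hq.symm

theorem pvAppendAt_keys (g : List (String × List (List (String × String)))) (n : String)
    (e : List (String × String)) : (pvAppendAt g n e).map Prod.fst = g.map Prod.fst := by
  induction g with
  | nil => rfl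
  | cons p t ih =>
    obtain ⟨m, l⟩ := p
    by_cases h : m = n <;> simp [pvAppendAt, h, ih]

theorem appendAt_map (n : String) (e : List (String × String)) (t : List (List (String × String)))
    (he : pvKey e = n) :
    ∀ (g : List (String × List (List (String × String)))),
      (g.map Prod.fst).Nodup → n ∈ g.map Prod.fst →
      (pvAppendAt g n e).map (fun p => (p.1, p.2 ++ t.filter (fun x => pvKey x == p.1))) =
      g.map (fun p => (p.1, p.2 ++ (e :: t).filter (fun x => pvKey x == p.1))) := by
  intro g
  induction g with
  | nil => simp
  | cons p tg ih =>
    obtain ⟨m, l⟩ := p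
    intro hnd hn
    simp at hnd
    by_cases h : m = n
    · subst h
      have htail : List.map (fun p => (p.1, p.2 ++ List.filter (fun x => pvKey x == p.1) t)) tg
          = List.map (fun p => (p.1, p.2 ++ List.filter (fun x => pvKey x == p.1) (e :: t))) tg := by
        apply List.map_congr_left
        rintro ⟨m', l'⟩ hm
        have hne : pvKey e ≠ m' := by
          rw [he]; intro hq
          exact hnd.1 l' (hq ▸ hm)
        simp [hne]
      simp [pvAppendAt, List.filter_cons, he, List.append_assoc, htail]
    · have hn' : n ∈ tg.map Prod.fst := by
        simp only [List.map_cons, List.mem_cons] at hn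
        tauto
      have hne : pvKey e ≠ m := he ▸ Ne.symm h
      simp [pvAppendAt, h, List.filter_cons, hne, ih hnd.2 hn']

theorem main_invariant (c : List (List (String × String))) :
    ∀ (k : Int) (g : List (String × List (List (String × String)))),
      (g.map Prod.fst).Nodup →
      List.foldl pvStepA (k, g) c =
      (k + (pvNN (g.map Prod.fst) c).length,
       g.map (fun p => (p.1, p.2 ++ c.filter (fun x => pvKey x == p.1)))
         ++ (pvNN (g.map Prod.fst) c).map (fun n => (n, c.filter (fun x => pvKey x == n)))) := by
  induction c with
  | nil => intro k g _; simp [pvNN]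
  | cons e t ih =>
    intro k g hnd
    by_cases h : pvKey e ∈ g.map Prod.fst
    · have hfind : (g.find? (fun p => p.1 == pvKey e)) ≠ none := by
        rw [Ne, find?_eq_none_iff]; simpa using h
      have hstep : pvStepA (k, g) e = (k, pvAppendAt g (pvKey e) e) := by
        simp [pvStepA, hfind]
      have hkeys := pvAppendAt_keys g (pvKey e) e
      rw [List.foldl_cons, hstep, ih k _ (by rw [hkeys]; exact hnd)]
      rw [hkeys]
      have hmap := appendAt_map (pvKey e) e t rfl g hnd h
      rw [hmap]
      have hNN : pvNN (g.map Prod.fst) (e :: t) = pvNN (g.map Prod.fst) t := by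
        simp [pvNN, h]
      rw [hNN]
      congr 1
      congr 1
      apply List.map_congr_left
      intro n hn
      have : pvKey e ≠ n := by
        intro hq; exact (mem_pvNN_not_mem hn) (hq ▸ h)
      simp [this]
    · have hfind : (g.find? (fun p => p.1 == pvKey e)) = none := by
        rw [find?_eq_none_iff]; exact h
      have hstep : pvStepA (k, g) e = (k + 1, g ++ [(pvKey e, [e])]) := by
        simp [pvStepA, hfind]
      have hnd' : ((g ++ [(pvKey e, [e])]).map Prod.fst).Nodup := by
        simp [List.nodup_append, hnd]
        intro a b hm hq; exact h (hq ▸ (List.mem_map.mpr ⟨(a, b), hm, rfl⟩))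
      rw [List.foldl_cons, hstep, ih (k + 1) _ hnd']
      have hk : (g ++ [(pvKey e, [e])]).map Prod.fst = g.map Prod.fst ++ [pvKey e] := by simp
      rw [hk]
      have hNN : pvNN (g.map Prod.fst) (e :: t)
          = pvKey e :: pvNN (g.map Prod.fst ++ [pvKey e]) t := by
        simp [pvNN, h]
      rw [hNN]
      refine Prod.ext ?_ ?_
      · simp; ring
      · simp only [List.map_append, List.map_cons, List.map_nil, List.append_assoc]
        congr 1
        · apply List.map_congr_left
          rintro ⟨m, l⟩ hm
          have : pvKey e ≠ m := by
            intro hq; exact h (hq ▸ (List.mem_map.mpr ⟨(m, l), hm, rfl⟩))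
          simp [this]
        · simp [List.filter_cons]
          intro n hn hq
          exact (mem_pvNN_not_mem hn) (by simp [hq])

theorem fromKeys_eq_pvNN (c : List (List (String × String))) :
    ∀ acc : List String, pvFromKeys acc (c.map pvKey) = acc ++ pvNN acc c := by
  induction c with
  | nil => intro acc; simp [pvFromKeys, pvNN]
  | cons e t ih =>
    intro acc
    by_cases h : pvKey e ∈ acc
    · simp [pvFromKeys, pvNN, h, ih]
    · simp [pvFromKeys, pvNN, h, ih (acc ++ [pvKey e])]

-- ===== VERDICT (by name: the statement is the Claim_ definition above) =====
theorem C_by_vendors_spec : Claim_equal_C_by_vendors := by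
  intro c _ _
  unfold Spec_C_by_vendors C_by_vendors C_by_vendors_alt
  rw [main_invariant c 0 [] (by simp)]
  have h := fromKeys_eq_pvNN c []
  simp at h
  simp [h]
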